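-- pv_equiv track=rewrite | github.com/ShaunCraft4/Password-Generator | Password_Generator.py | Check
-- ===== SOURCE A (Python) =====
-- def Check(password):
--     score=0
--     advice=""
--     if len(password)>12:
--         score+=1
--     else:
--         advice+="Try having more than 12 characters.\n"
--     d={"UpperCase":0,"LowerCase":0,"Digits":0,"SpecialCharacters":0}
--     for i in password:
--         if i.isupper():
--             d["UpperCase"]+=1
--         if i.islower():
--             d["LowerCase"]+=1
--         if i.isdigit():
--             d["Digits"]+=1
--         if i.isalnum()==False:
--             d["SpecialCharacters"]+=1
--     for i in d:
--         if d[i]>0: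
--             score+=1
--         elif i=="UpperCase":
--             advice+="Try having more uppercase letters.\n"
--         elif i=="LowerCase":
--             advice+="Try having more lowercase letters.\n"
--         elif i=="Digits":
--             advice+="Try having more numbers.\n"
--         elif i=="SpecialCharacters":
--             advice+="Try having more special characters.\n"
--     return (score,advice)
-- ===== SOURCE B (Python) =====
-- def Check(password):
--     has_len = len(password) > 12
--     has_upper = any(c.isupper() for c in password)
--     has_lower = any(c.islower() for c in password)
--     has_digit = any(c.isdigit() for c in password)
--     has_special = any(not c.isalnum() for c in password)
--     score = has_len + has_upper + has_lower + has_digit + has_special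
--     advice = ""
--     if not has_len:
--         advice += "Try having more than 12 characters.\n"
--     if not has_upper:
--         advice += "Try having more uppercase letters.\n"
--     if not has_lower:
--         advice += "Try having more lowercase letters.\n"
--     if not has_digit:
--         advice += "Try having more numbers.\n"
--     if not has_special:
--         advice += "Try having more special characters.\n"
--     return (score, advice)
-- ===== Notes on version B (the rewrite author's own statement) =====
-- stated objective: simpler
-- what changed: Replaces A's per-category counting dict (one counting loop plus a loop over the dict's keys) with five existence checks whose booleans are summed for the score and tested once each for the advice lines.
import Mathlib
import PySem

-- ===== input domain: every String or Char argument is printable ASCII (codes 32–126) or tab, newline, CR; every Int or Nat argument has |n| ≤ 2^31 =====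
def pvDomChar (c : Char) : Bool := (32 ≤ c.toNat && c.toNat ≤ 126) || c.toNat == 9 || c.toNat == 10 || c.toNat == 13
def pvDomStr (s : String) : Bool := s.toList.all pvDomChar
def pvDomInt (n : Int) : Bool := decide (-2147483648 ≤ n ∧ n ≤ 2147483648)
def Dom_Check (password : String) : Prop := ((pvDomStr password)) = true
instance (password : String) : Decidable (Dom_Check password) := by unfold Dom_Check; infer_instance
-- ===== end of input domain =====

-- B replaces A's count-dict and key loop by five existence flags summed as the score; same return value, stated as 'simpler'.

-- ===== PORT A =====
-- the body of A's counting loop over the characters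
def CheckStep (d : PySem.Dict String Int) (i : Char) : PySem.Dict String Int :=
  let d := if PySem.Chars.isupper i then d.modify "UpperCase" 0 (· + 1) else d
  let d := if PySem.Chars.islower i then d.modify "LowerCase" 0 (· + 1) else d
  let d := if PySem.Chars.isdigit i then d.modify "Digits" 0 (· + 1) else d
  let d := if PySem.Chars.isalnum i == false then d.modify "SpecialCharacters" 0 (· + 1) else d
  d

def Check (password : String) : Int × String :=
  let sa : Int × String :=
    if PySem.Str.len password > 12 then ((0 : Int) + 1, "")
    else ((0 : Int), "" ++ "Try having more than 12 characters.\n")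
  let d : PySem.Dict String Int :=
    PySem.Dict.ofList [("UpperCase", 0), ("LowerCase", 0), ("Digits", 0), ("SpecialCharacters", 0)]
  let d := password.toList.foldl CheckStep d
  let sa := d.keys.foldl (fun (sa : Int × String) i =>
      if d.getD i 0 > 0 then (sa.1 + 1, sa.2)
      else if i = "UpperCase" then (sa.1, sa.2 ++ "Try having more uppercase letters.\n")
      else if i = "LowerCase" then (sa.1, sa.2 ++ "Try having more lowercase letters.\n")
      else if i = "Digits" then (sa.1, sa.2 ++ "Try having more numbers.\n")
      else if i = "SpecialCharacters" then (sa.1, sa.2 ++ "Try having more special characters.\n")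
      else sa) sa
  sa

-- ===== PORT B =====
def Check_alt (password : String) : Int × String :=
  let hasLen : Bool := decide (PySem.Str.len password > 12)
  let hasUpper : Bool := password.toList.any PySem.Chars.isupper
  let hasLower : Bool := password.toList.any PySem.Chars.islower
  let hasDigit : Bool := password.toList.any PySem.Chars.isdigit
  let hasSpecial : Bool := password.toList.any (fun c => !(PySem.Chars.isalnum c))
  let score : Int := (if hasLen then 1 else 0) + (if hasUpper then 1 else 0)
    + (if hasLower then 1 else 0) + (if hasDigit then 1 else 0) + (if hasSpecial then 1 else 0)
  let advice : String := ""
  let advice := if hasLen then advice else advice ++ "Try having more than 12 characters.\n"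
  let advice := if hasUpper then advice else advice ++ "Try having more uppercase letters.\n"
  let advice := if hasLower then advice else advice ++ "Try having more lowercase letters.\n"
  let advice := if hasDigit then advice else advice ++ "Try having more numbers.\n"
  let advice := if hasSpecial then advice else advice ++ "Try having more special characters.\n"
  (score, advice)

-- ===== PRECONDITION & SPEC =====
def Spec_Check (password : String) (out : Int × String) : Prop := out = Check_alt password
instance (password : String) (out : Int × String) : Decidable (Spec_Check password out) := by unfold Spec_Check; infer_instance

-- ===== CLAIM (what is proved, stated in full; the proofs are below) =====
def Claim_equal_Check : Prop := ∀ (password : String), Dom_Check password → Spec_Check password (Check password)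

-- ===== LEMMAS AND PROOFS =====

lemma check_ofList_eq_mk :
    (PySem.Dict.ofList [("UpperCase", (0:Int)), ("LowerCase", 0), ("Digits", 0), ("SpecialCharacters", 0)]) =
    PySem.Dict.mk [("UpperCase", (0:Int)), ("LowerCase", 0), ("Digits", 0), ("SpecialCharacters", 0)] := by
  decide

-- A's counting loop computes exactly the four countP's
lemma check_fold_counts (cs : List Char) (a b c e : Int) :
    cs.foldl CheckStep (PySem.Dict.mk [("UpperCase", a), ("LowerCase", b), ("Digits", c), ("SpecialCharacters", e)]) =
    PySem.Dict.mk [("UpperCase", a + (cs.countP PySem.Chars.isupper : Int)),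
                   ("LowerCase", b + (cs.countP PySem.Chars.islower : Int)),
                   ("Digits", c + (cs.countP PySem.Chars.isdigit : Int)),
                   ("SpecialCharacters", e + (cs.countP (fun x => !(PySem.Chars.isalnum x)) : Int))] := by
  induction cs generalizing a b c e with
  | nil => simp
  | cons c0 cs ih =>
    rw [List.foldl_cons]
    have hstep : CheckStep (PySem.Dict.mk [("UpperCase", a), ("LowerCase", b), ("Digits", c), ("SpecialCharacters", e)]) c0 =
        PySem.Dict.mk [("UpperCase", a + if PySem.Chars.isupper c0 then 1 else 0),
                       ("LowerCase", b + if PySem.Chars.islower c0 then 1 else 0),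
                       ("Digits", c + if PySem.Chars.isdigit c0 then 1 else 0),
                       ("SpecialCharacters", e + if !(PySem.Chars.isalnum c0) then 1 else 0)] := by
      unfold CheckStep
      by_cases h1 : PySem.Chars.isupper c0 <;>
      by_cases h2 : PySem.Chars.islower c0 <;>
      by_cases h3 : PySem.Chars.isdigit c0 <;>
      by_cases h4 : PySem.Chars.isalnum c0 <;>
      simp [h1, h2, h3, h4, PySem.Dict.modify, PySem.Dict.insert, PySem.Dict.getD,
            PySem.Dict.get?, PySem.Dict.contains]
    rw [hstep, ih]
    have harith : ∀ (v : Int) (p : Char → Bool),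
        (v + if p c0 then 1 else 0) + (cs.countP p : Int) = v + ((c0 :: cs).countP p : Int) := by
      intro v p
      rw [List.countP_cons]
      split_ifs with h <;> push_cast <;> omega
    simp only [harith a PySem.Chars.isupper, harith b PySem.Chars.islower,
               harith c PySem.Chars.isdigit, harith e (fun x => !(PySem.Chars.isalnum x))]

-- ===== VERDICT (by name: the statement is the Claim_ definition above) =====
set_option maxRecDepth 8192 in
set_option maxHeartbeats 3200000 in
theorem Check_spec : Claim_equal_Check := by
  unfold Claim_equal_Check
  intro password _
  simp only [Spec_Check, Check, Check_alt]
  rw [check_ofList_eq_mk, check_fold_counts password.toList 0 0 0 0]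
  simp only [PySem.Dict.keys, List.map_cons, List.map_nil,
             List.foldl_cons, List.foldl_nil, PySem.Dict.getD_eq_get?_getD,
             PySem.Dict.get?_mk_cons]
  norm_num
  simp
  by_cases h0 : 12 < password.length <;>
  by_cases h1 : ∃ a ∈ password.toList, PySem.Chars.isupper a = true <;>
  by_cases h2 : ∃ a ∈ password.toList, PySem.Chars.islower a = true <;>
  by_cases h3 : ∃ a ∈ password.toList, PySem.Chars.isdigit a = true <;>
  by_cases h4 : ∃ a ∈ password.toList, PySem.Chars.isalnum a = false <;>
  simp [h0, h1, h2, h3, h4]
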